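-- pv_equiv track=rewrite | github.com/PicoPlanetDev/computational-math | unit-4/sigmondTwoDListQuiz.py | smallestSumOfAColumn
-- ===== SOURCE A (Python) =====
-- def isRaggedList(L):
--     maxrow = len(L[0])
--     for row in L:
--         if len(row) != maxrow:
--             return True
--     return False
--
-- def smallestSumOfAColumn(L):
--
--     colsOfL = []
--
--     for i in range(len(L[0])):
--         col=[]
--         for row in L:
--             col.append(row[i])
--         colsOfL.append(col)
--
--
--     smallest = 100000000000
--     rowof = 0
--     if isRaggedList(colsOfL) == False:
--         for i in range(len(colsOfL)):
--             if sum(colsOfL[i]) < smallest: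
--                 smallest = sum(colsOfL[i])
--                 rowof = i
--     if isRaggedList(colsOfL) == True:
--         for i in range(len(colsOfL)):
--             if len(colsOfL[i]) == len(colsOfL):
--                 if sum(colsOfL[i]) < smallest:
--                         smallest = sum(colsOfL[i])
--                         rowof = i
--
--
--     return (rowof, smallest)
-- ===== SOURCE B (Python) =====
-- def smallestSumOfAColumn(L):
--     n = len(L[0])
--     sums = [0] * n
--     for row in L:
--         sums = [sums[i] + row[i] for i in range(n)]
--     smallest = 100000000000
--     rowof = 0
--     for i in range(len(sums)):
--         if sums[i] < smallest:
--             smallest = sums[i]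
--             rowof = i
--     return (rowof, smallest)
-- ===== Notes on version B (the rewrite author's own statement) =====
-- stated objective: simpler
-- what changed: B maintains running column sums in one pass over the rows instead of materializing the full transpose, drops A's always-dead ragged-transpose branch, and avoids A's repeated sum() calls; the minimum scan (sentinel 100000000000, strict <, first minimum wins) is unchanged.
-- crash fix: On inputs whose first row is empty but the list is nonempty, A raises IndexError (isRaggedList indexes the empty transpose) while B returns (0, 100000000000). — e.g. on smallestSumOfAColumn([[]]): A raises IndexError, B returns (0, 100000000000)
import Mathlib
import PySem

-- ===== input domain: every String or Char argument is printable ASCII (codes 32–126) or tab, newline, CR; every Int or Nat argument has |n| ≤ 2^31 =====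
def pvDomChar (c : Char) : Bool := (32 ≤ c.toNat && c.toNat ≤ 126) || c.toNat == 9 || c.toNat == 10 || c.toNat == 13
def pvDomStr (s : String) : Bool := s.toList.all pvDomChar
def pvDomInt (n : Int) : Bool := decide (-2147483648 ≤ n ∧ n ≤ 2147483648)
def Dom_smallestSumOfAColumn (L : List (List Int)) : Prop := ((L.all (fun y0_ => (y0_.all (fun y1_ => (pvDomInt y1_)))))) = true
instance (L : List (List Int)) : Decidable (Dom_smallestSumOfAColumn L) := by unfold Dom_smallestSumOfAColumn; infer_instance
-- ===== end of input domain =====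

-- B maintains running column sums in one pass instead of materializing the transpose,
-- and drops A's always-dead ragged branch (objective: simpler).


-- ===== PORT A =====
def pvIsRaggedList (L : List (List Int)) : Bool :=
  let maxrow := (PySem.List.pyGetD L 0 []).length
  L.any (fun row => decide (row.length ≠ maxrow))

def smallestSumOfAColumn (L : List (List Int)) : Int × Int :=
  let colsOfL := (PySem.List.pyRange 0 ((PySem.List.pyGetD L 0 []).length : Int) 1).map
      (fun i => L.foldl (fun col row => col ++ [PySem.List.pyGetD row i 0]) [])
  let sr0 : Int × Int := (100000000000, 0)
  let sr1 :=
    if pvIsRaggedList colsOfL = false then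
      (PySem.List.pyRange 0 (colsOfL.length : Int) 1).foldl
        (fun sr i => if (PySem.List.pyGetD colsOfL i []).sum < sr.1
                     then ((PySem.List.pyGetD colsOfL i []).sum, i) else sr) sr0
    else sr0
  let sr2 :=
    if pvIsRaggedList colsOfL = true then
      (PySem.List.pyRange 0 (colsOfL.length : Int) 1).foldl
        (fun sr i => if (PySem.List.pyGetD colsOfL i []).length = colsOfL.length then
                       (if (PySem.List.pyGetD colsOfL i []).sum < sr.1
                        then ((PySem.List.pyGetD colsOfL i []).sum, i) else sr) else sr) sr1
    else sr1
  (sr2.2, sr2.1)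

-- ===== PORT B =====
def smallestSumOfAColumn_alt (L : List (List Int)) : Int × Int :=
  let n := (PySem.List.pyGetD L 0 []).length
  let sums := L.foldl
      (fun sums row => (PySem.List.pyRange 0 (n : Int) 1).map
         (fun i => PySem.List.pyGetD sums i 0 + PySem.List.pyGetD row i 0))
      (List.replicate n 0)
  let sr := (PySem.List.pyRange 0 (sums.length : Int) 1).foldl
      (fun sr i => if PySem.List.pyGetD sums i 0 < sr.1
                   then (PySem.List.pyGetD sums i 0, i) else sr)
      ((100000000000 : Int), (0 : Int))
  (sr.2, sr.1)

-- ===== PRECONDITION & SPEC =====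
-- Pre_ excludes exactly the inputs where Python A raises IndexError: the empty list,
-- a list whose first row is empty, or a row shorter than the first row.
def Pre_smallestSumOfAColumn (L : List (List Int)) : Prop :=
  L ≠ [] ∧ L.headI ≠ [] ∧ ∀ row ∈ L, L.headI.length ≤ row.length
instance (L : List (List Int)) : Decidable (Pre_smallestSumOfAColumn L) := by
  unfold Pre_smallestSumOfAColumn; infer_instance
def pvWitness_smallestSumOfAColumn : List (List Int) := [[1, 2], [3, 0]]

-- A raises IndexError when the list is nonempty but its first row is empty; B returns (0, 100000000000).
def Raises_smallestSumOfAColumn (L : List (List Int)) : Prop := L ≠ [] ∧ L.headI = []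
instance (L : List (List Int)) : Decidable (Raises_smallestSumOfAColumn L) := by
  unfold Raises_smallestSumOfAColumn; infer_instance
def pvRaiseWitness_smallestSumOfAColumn : List (List Int) := [[]]
def pvRaiseWitnessOut_smallestSumOfAColumn : Int × Int := (0, 100000000000)

def Spec_smallestSumOfAColumn (L : List (List Int)) (out : Int × Int) : Prop := out = smallestSumOfAColumn_alt L
instance (L : List (List Int)) (out : Int × Int) : Decidable (Spec_smallestSumOfAColumn L out) := by unfold Spec_smallestSumOfAColumn; infer_instance

-- ===== CLAIM (what is proved, stated in full; the proofs are below) =====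
def Claim_equal_smallestSumOfAColumn : Prop := ∀ (L : List (List Int)), Dom_smallestSumOfAColumn L → Pre_smallestSumOfAColumn L → Spec_smallestSumOfAColumn L (smallestSumOfAColumn L)
def Claim_raises_smallestSumOfAColumn : Prop := (∀ (L : List (List Int)), Dom_smallestSumOfAColumn L → Raises_smallestSumOfAColumn L → ¬ Pre_smallestSumOfAColumn L) ∧ (Dom_smallestSumOfAColumn (pvRaiseWitness_smallestSumOfAColumn) ∧ Raises_smallestSumOfAColumn (pvRaiseWitness_smallestSumOfAColumn) ∧ smallestSumOfAColumn_alt (pvRaiseWitness_smallestSumOfAColumn) = pvRaiseWitnessOut_smallestSumOfAColumn)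

-- ===== LEMMAS AND PROOFS =====

-- the column sums: for index i, sum of row[i] over the rows of L
def pvColSum (L : List (List Int)) (i : Int) : Int :=
  (L.map (fun row => PySem.List.pyGetD row i 0)).sum

theorem pv_sums_inv (L : List (List Int)) (n : Nat) (f : Int → Int) :
    L.foldl
      (fun sums row => (PySem.List.pyRange 0 (n : Int) 1).map
         (fun i => PySem.List.pyGetD sums i 0 + PySem.List.pyGetD row i 0))
      ((PySem.List.pyRange 0 (n : Int) 1).map f)
    = (PySem.List.pyRange 0 (n : Int) 1).map (fun i => f i + pvColSum L i) := by
  induction L generalizing f with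
  | nil => simp [pvColSum]
  | cons row rest ih =>
    simp only [List.foldl_cons]
    have hstep : (PySem.List.pyRange 0 (n : Int) 1).map
        (fun i => PySem.List.pyGetD ((PySem.List.pyRange 0 (n : Int) 1).map f) i 0
                  + PySem.List.pyGetD row i 0)
        = (PySem.List.pyRange 0 (n : Int) 1).map
            (fun i => f i + PySem.List.pyGetD row i 0) := by
      apply List.map_congr_left
      intro i hi
      rw [PySem.List.mem_pyRange_one] at hi
      rw [PySem.List.pyGetD_map_pyRange_of_nonneg f (n : Int) i 0 hi.1 hi.2]
    rw [hstep, ih]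
    apply List.map_congr_left
    intro i _
    simp [pvColSum, add_assoc]

theorem pv_ragged_false (n : Nat) (g : Int → List Int) (m : Nat)
    (hg : ∀ i, (g i).length = m) :
    pvIsRaggedList ((PySem.List.pyRange 0 (n : Int) 1).map g) = false := by
  unfold pvIsRaggedList
  cases n with
  | zero => simp [PySem.List.pyRange_one_eq_nil]
  | succ k =>
    have hcons : PySem.List.pyRange 0 ((k + 1 : Nat) : Int) 1
        = 0 :: PySem.List.pyRange 1 ((k + 1 : Nat) : Int) 1 := by
      rw [PySem.List.pyRange_one_cons (by push_cast; omega)]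
      norm_num
    rw [hcons]
    simp [hg]

theorem pv_main (L : List (List Int)) (h : Pre_smallestSumOfAColumn L) :
    smallestSumOfAColumn L = smallestSumOfAColumn_alt L := by
  obtain ⟨hne, hh, hlen⟩ := h
  unfold smallestSumOfAColumn smallestSumOfAColumn_alt
  dsimp only
  set n := (PySem.List.pyGetD L 0 []).length with hn
  -- columns are built by appending: each column i is L.map (row ↦ row[i])
  have hcol : ∀ i : Int,
      L.foldl (fun col row => col ++ [PySem.List.pyGetD row i 0]) []
        = L.map (fun row => PySem.List.pyGetD row i 0) := by
    intro i
    rw [PySem.List.foldl_append_singleton_eq_map]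
    simp
  have hcols : (PySem.List.pyRange 0 (n : Int) 1).map
      (fun i => L.foldl (fun col row => col ++ [PySem.List.pyGetD row i 0]) [])
      = (PySem.List.pyRange 0 (n : Int) 1).map
          (fun i => L.map (fun row => PySem.List.pyGetD row i 0)) :=
    List.map_congr_left (fun i _ => hcol i)
  rw [hcols]
  -- the transpose is never ragged
  have hrag : pvIsRaggedList ((PySem.List.pyRange 0 (n : Int) 1).map
      (fun i => L.map (fun row => PySem.List.pyGetD row i 0))) = false :=
    pv_ragged_false n _ L.length (fun i => by simp)
  rw [hrag]
  simp only [Bool.false_eq_true, if_true, if_false]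
  -- B's sums list equals the list of column sums
  have hrepl : (List.replicate n (0 : Int))
      = (PySem.List.pyRange 0 (n : Int) 1).map (fun _ => (0 : Int)) := by
    simp [List.map_const', PySem.List.length_pyRange_one]
  rw [hrepl, pv_sums_inv L n (fun _ => 0)]
  simp only [zero_add]
  -- both scans fold over the same index range with the same values
  have hlenA : (((PySem.List.pyRange 0 (n : Int) 1).map
      (fun i => L.map (fun row => PySem.List.pyGetD row i 0))).length : Int) = (n : Int) := by
    simp [PySem.List.length_pyRange_one]
  have hlenB : (((PySem.List.pyRange 0 (n : Int) 1).map (fun i => pvColSum L i)).length : Int)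
      = (n : Int) := by
    simp [PySem.List.length_pyRange_one, pvColSum]
  rw [hlenA, hlenB]
  have hf :
      (PySem.List.pyRange 0 (n : Int) 1).foldl
        (fun (sr : Int × Int) i =>
          if (PySem.List.pyGetD ((PySem.List.pyRange 0 (n : Int) 1).map
                (fun i => L.map (fun row => PySem.List.pyGetD row i 0))) i []).sum < sr.1
          then ((PySem.List.pyGetD ((PySem.List.pyRange 0 (n : Int) 1).map
                (fun i => L.map (fun row => PySem.List.pyGetD row i 0))) i []).sum, i)
          else sr)
        ((100000000000 : Int), (0 : Int))
      = (PySem.List.pyRange 0 (n : Int) 1).foldl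
        (fun (sr : Int × Int) i =>
          if PySem.List.pyGetD ((PySem.List.pyRange 0 (n : Int) 1).map (fun i => pvColSum L i)) i 0 < sr.1
          then (PySem.List.pyGetD ((PySem.List.pyRange 0 (n : Int) 1).map (fun i => pvColSum L i)) i 0, i)
          else sr)
        ((100000000000 : Int), (0 : Int)) := by
    apply PySem.List.foldl_congr_mem
    intro sr i hi
    rw [PySem.List.mem_pyRange_one] at hi
    rw [PySem.List.pyGetD_map_pyRange_of_nonneg _ (n : Int) i [] hi.1 hi.2,
        PySem.List.pyGetD_map_pyRange_of_nonneg _ (n : Int) i 0 hi.1 hi.2]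
    simp [pvColSum]
  rw [hf]

-- ===== VERDICT (by name: the statement is the Claim_ definition above) =====
theorem smallestSumOfAColumn_spec : Claim_equal_smallestSumOfAColumn := by
  intro L _ hpre
  unfold Spec_smallestSumOfAColumn
  exact pv_main L hpre

@[simp] theorem smallestSumOfAColumn_raises : Claim_raises_smallestSumOfAColumn := by
  unfold Claim_raises_smallestSumOfAColumn
  refine ⟨?_, by decide⟩
  intro L _ hr hpre
  exact hpre.2.1 hr.2
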